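-- pv_equiv track=rewrite | github.com/Ga420Low/project-os-core | src/project_os_core/debug_discord_audit.py | _axis_status
-- ===== SOURCE A (Python) =====
-- from typing import Any
--
-- def _axis_status(rows: list[dict[str, Any]], scenario_ids: set[str]) -> str:
--     matching = [row for row in rows if str(row.get("scenario_id") or "") in scenario_ids]
--     if not matching:
--         return "unverified"
--     outcomes = {str(row.get("outcome") or "").upper() for row in matching}
--     if "REGRESSION" in outcomes or "FAIL" in outcomes:
--         return "fail"
--     if outcomes <= {"SKIP"}:
--         return "unverified"
--     if "FALSE_POSITIVE" in outcomes:
--         return "attention"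
--     return "pass"
-- ===== SOURCE B (Python) =====
-- from typing import Any
--
-- def _axis_status(rows: list[dict[str, Any]], scenario_ids: set[str]) -> str:
--     # Severity-ranking algorithm: each matching outcome maps to a numeric
--     # severity, the answer is a table lookup at the maximum severity
--     # (default 0 when no row matches).  No priority ladder of tests.
--     def severity(outcome: str) -> int:
--         if outcome in ("REGRESSION", "FAIL"):
--             return 3
--         if outcome == "FALSE_POSITIVE":
--             return 2
--         if outcome == "SKIP":
--             return 0
--         return 1
--     rank = max(
--         (severity(str(row.get("outcome") or "").upper())
--          for row in rows
--          if str(row.get("scenario_id") or "") in scenario_ids),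
--         default=0,
--     )
--     return ("unverified", "pass", "attention", "fail")[rank]
-- ===== Notes on version B (the rewrite author's own statement) =====
-- stated objective: alternative
-- what changed: A's priority ladder of set membership/subset tests over a built outcomes set is replaced by a different algorithm: each matching outcome is mapped to a numeric severity (REGRESSION/FAIL=3, FALSE_POSITIVE=2, other=1, SKIP=0), reduced with max (default 0 when nothing matches), and the answer is a table lookup at that rank.
import Mathlib
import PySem

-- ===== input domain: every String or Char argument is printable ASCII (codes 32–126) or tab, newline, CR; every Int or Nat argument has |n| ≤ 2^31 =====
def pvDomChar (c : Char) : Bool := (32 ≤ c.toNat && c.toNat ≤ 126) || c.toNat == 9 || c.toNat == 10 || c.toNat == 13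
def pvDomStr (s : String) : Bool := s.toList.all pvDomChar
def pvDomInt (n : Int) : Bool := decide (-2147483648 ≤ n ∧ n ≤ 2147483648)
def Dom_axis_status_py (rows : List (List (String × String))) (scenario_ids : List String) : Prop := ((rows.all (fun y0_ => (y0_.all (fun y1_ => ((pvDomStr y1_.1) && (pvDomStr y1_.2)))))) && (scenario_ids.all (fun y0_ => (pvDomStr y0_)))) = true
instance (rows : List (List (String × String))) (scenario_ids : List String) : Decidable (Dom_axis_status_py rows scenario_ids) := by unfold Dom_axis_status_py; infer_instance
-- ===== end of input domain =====

-- B replaces A's priority ladder over an outcomes set by a max-of-numeric-severities reduction with a result table; objective: alternative.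

-- shared coercion helper: str(row.get(k) or "") — None and "" both give "" (values here are strings)
def pvRowStr (row : List (String × String)) (k : String) : String :=
  match (PySem.Dict.mk row).get? k with
  | none => ""
  | some s => s

-- ===== PORT A =====
def axis_status_py (rows : List (List (String × String))) (scenario_ids : List String) : String :=
  let matching := rows.filter (fun row => PySem.Set.contains scenario_ids (pvRowStr row "scenario_id"))
  if matching = [] then "unverified"
  else
    let outcomes : PySem.Set String :=
      matching.foldl (fun s row => PySem.Set.add s (PySem.Str.upper (pvRowStr row "outcome"))) PySem.Set.empty
    if PySem.Set.contains outcomes "REGRESSION" || PySem.Set.contains outcomes "FAIL" then "fail"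
    else if PySem.Set.issubset outcomes ["SKIP"] then "unverified"
    else if PySem.Set.contains outcomes "FALSE_POSITIVE" then "attention"
    else "pass"

-- ===== PORT B =====
-- severity : numeric rank of one outcome (Source B's helper)
def pvSeverity (outcome : String) : Nat :=
  if outcome = "REGRESSION" ∨ outcome = "FAIL" then 3
  else if outcome = "FALSE_POSITIVE" then 2
  else if outcome = "SKIP" then 0
  else 1

def axis_status_py_alt (rows : List (List (String × String))) (scenario_ids : List String) : String :=
  -- max(severity(...) for matching rows, default=0), as a fold
  let rank := rows.foldl (fun (r : Nat) row =>
      if PySem.Set.contains scenario_ids (pvRowStr row "scenario_id") then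
        max r (pvSeverity (PySem.Str.upper (pvRowStr row "outcome")))
      else r) 0
  -- ("unverified", "pass", "attention", "fail")[rank]
  match rank with
  | 0 => "unverified"
  | 1 => "pass"
  | 2 => "attention"
  | _ => "fail"

-- ===== PRECONDITION & SPEC =====
def Spec_axis_status_py (rows : List (List (String × String))) (scenario_ids : List String) (out : String) : Prop := out = axis_status_py_alt rows scenario_ids
instance (rows : List (List (String × String))) (scenario_ids : List String) (out : String) : Decidable (Spec_axis_status_py rows scenario_ids out) := by unfold Spec_axis_status_py; infer_instance

-- ===== CLAIM =====
def Claim_equal_axis_status_py : Prop := ∀ (rows : List (List (String × String))) (scenario_ids : List String), Dom_axis_status_py rows scenario_ids → Spec_axis_status_py rows scenario_ids (axis_status_py rows scenario_ids)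

-- ===== LEMMAS AND PROOFS =====

-- abbreviations used only by the proofs
def pvP (ids : List String) (row : List (String × String)) : Bool :=
  PySem.Set.contains ids (pvRowStr row "scenario_id")
def pvU (row : List (String × String)) : String :=
  PySem.Str.upper (pvRowStr row "outcome")

-- pvG m = what the max-severity of the rows of m is, expressed through A's three tests
def pvG (m : List (List (String × String))) : Nat :=
  if m.any (fun r => decide (pvU r = "REGRESSION" ∨ pvU r = "FAIL")) then 3
  else if m.all (fun r => decide (pvU r = "SKIP")) then 0
  else if m.any (fun r => decide (pvU r = "FALSE_POSITIVE")) then 2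
  else 1

theorem pv_g_cons (r : List (String × String)) (rs : List (List (String × String))) :
    pvG (r :: rs) = max (pvSeverity (pvU r)) (pvG rs) := by
  unfold pvG pvSeverity
  simp only [List.any_cons, List.all_cons]
  by_cases h1 : pvU r = "REGRESSION" ∨ pvU r = "FAIL"
  · simp only [h1, decide_true, Bool.true_or, if_true]
    split_ifs <;> simp_all
  · simp only [h1, decide_false, Bool.false_or]
    by_cases h2 : pvU r = "FALSE_POSITIVE"
    · have h3 : ¬ pvU r = "SKIP" := by rw [h2]; decide
      simp only [h2, decide_true, Bool.true_or, if_false]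
      split_ifs <;> simp_all
    · by_cases h3 : pvU r = "SKIP"
      · simp only [h3, decide_true, Bool.true_and]
        split_ifs <;> simp_all
      · simp only [h2, h3, decide_false, Bool.false_and, Bool.false_or, if_false]
        split_ifs <;> simp_all
        obtain ⟨x, hx, hfp⟩ := ‹∃ x ∈ rs, pvU x = "FALSE_POSITIVE"›
        have hs := ‹∀ x ∈ rs, pvU x = "SKIP"› x hx
        rw [hs] at hfp
        exact absurd hfp (by decide)

-- B's fold over rows computes max a (pvG (matching rows))
theorem pv_bfold (ids : List String) (rows : List (List (String × String))) (a : Nat) :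
    rows.foldl (fun (r : Nat) row =>
      if PySem.Set.contains ids (pvRowStr row "scenario_id") then
        max r (pvSeverity (PySem.Str.upper (pvRowStr row "outcome")))
      else r) a
    = max a (pvG (rows.filter (pvP ids))) := by
  induction rows generalizing a with
  | nil => simp [pvG]
  | cons r rs ih =>
    simp only [List.foldl_cons, List.filter_cons]
    by_cases hc : PySem.Set.contains ids (pvRowStr r "scenario_id") = true
    · have hp : pvP ids r = true := hc
      rw [hc, hp]
      simp only [if_true, ih, pv_g_cons]
      have : pvSeverity (PySem.Str.upper (pvRowStr r "outcome")) = pvSeverity (pvU r) := rfl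
      rw [this]
      omega
    · have hc' : PySem.Set.contains ids (pvRowStr r "scenario_id") = false := Bool.eq_false_iff.mpr hc
      have hp : pvP ids r = false := hc'
      rw [hc', hp]
      simp only [Bool.false_eq_true, if_false, ih]

-- the outcomes set A builds is set(map upper-outcome matching)
theorem pv_outcomes_eq (m : List (List (String × String))) :
    m.foldl (fun s row => PySem.Set.add s (PySem.Str.upper (pvRowStr row "outcome"))) PySem.Set.empty
    = PySem.Set.ofList (m.map pvU) := by
  rw [PySem.Set.ofList_eq_foldl, List.foldl_map]
  rfl

-- A's three set conditions as any/all over the matching rows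
theorem pv_e1 (m : List (List (String × String))) :
    ((PySem.Set.ofList (m.map pvU)).contains "REGRESSION"
      || (PySem.Set.ofList (m.map pvU)).contains "FAIL")
    = (m.any fun r => decide (pvU r = "REGRESSION" ∨ pvU r = "FAIL")) := by
  rw [Bool.eq_iff_iff]
  simp only [Bool.or_eq_true, PySem.Set.contains_iff, PySem.Set.mem_ofList, List.mem_map,
    List.any_eq_true, decide_eq_true_eq]
  constructor
  · rintro (⟨r, hr, h⟩ | ⟨r, hr, h⟩)
    exacts [⟨r, hr, Or.inl h⟩, ⟨r, hr, Or.inr h⟩]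
  · rintro ⟨r, hr, h | h⟩
    exacts [Or.inl ⟨r, hr, h⟩, Or.inr ⟨r, hr, h⟩]

theorem pv_e2 (m : List (List (String × String))) :
    (PySem.Set.ofList (m.map pvU)).issubset ["SKIP"]
    = (m.all fun r => decide (pvU r = "SKIP")) := by
  rw [Bool.eq_iff_iff, PySem.Set.issubset_iff]
  simp only [PySem.Set.mem_ofList, List.mem_map, List.mem_singleton, List.all_eq_true,
    decide_eq_true_eq]
  constructor
  · intro h r hr
    exact h _ ⟨r, hr, rfl⟩
  · rintro h x ⟨r, hr, rfl⟩
    exact h r hr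

theorem pv_e3 (m : List (List (String × String))) :
    (PySem.Set.ofList (m.map pvU)).contains "FALSE_POSITIVE"
    = (m.any fun r => decide (pvU r = "FALSE_POSITIVE")) := by
  rw [Bool.eq_iff_iff]
  simp only [PySem.Set.contains_iff, PySem.Set.mem_ofList, List.mem_map,
    List.any_eq_true, decide_eq_true_eq]

-- ===== VERDICT =====
theorem axis_status_py_spec : Claim_equal_axis_status_py := by
  intro rows scenario_ids _
  show axis_status_py rows scenario_ids = axis_status_py_alt rows scenario_ids
  unfold axis_status_py axis_status_py_alt
  rw [pv_bfold]
  dsimp only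
  rw [pv_outcomes_eq]
  have hfe : (rows.filter (fun row => PySem.Set.contains scenario_ids (pvRowStr row "scenario_id")))
      = rows.filter (pvP scenario_ids) := rfl
  rw [hfe]
  generalize rows.filter (pvP scenario_ids) = m
  rw [Nat.zero_max]
  by_cases h0 : m = []
  · subst h0; simp [pvG]
  · rw [if_neg h0]
    rw [pv_e1, pv_e2, pv_e3]
    unfold pvG
    by_cases b1 : (m.any fun r => decide (pvU r = "REGRESSION" ∨ pvU r = "FAIL")) = true
    · rw [b1]; rfl
    · rw [Bool.not_eq_true] at b1
      rw [b1]
      by_cases b2 : (m.all fun r => decide (pvU r = "SKIP")) = true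
      · rw [b2]; rfl
      · rw [Bool.not_eq_true] at b2
        rw [b2]
        by_cases b3 : (m.any fun r => decide (pvU r = "FALSE_POSITIVE")) = true
        · rw [b3]; rfl
        · rw [Bool.not_eq_true] at b3
          rw [b3]; rfl
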